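-- pv_equiv track=rewrite | github.com/roblox-compilers/roblox-py | src/rbxpy.py | extract_str
-- ===== SOURCE A (Python) =====
-- def extract_str(indicator, chars):
--     out = ""
--     for letter in chars[1:]:
--         if letter == indicator:
--             break
--
--         out = out+letter
--     del chars[0:len(out)+2]
--     return out
-- ===== SOURCE B (Python) =====
-- def extract_str(indicator, chars):
--     rest = chars[1:]
--     idx = rest.index(indicator) if indicator in rest else len(rest)
--     out = "".join(rest[:idx])
--     del chars[0:len(out) + 2]
--     return out
-- ===== Notes on version B (the rewrite author's own statement) =====
-- stated objective: idiomatic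
-- what changed: Replaces the accumulate-until-break loop by locating the indicator's index in chars[1:] and joining the slice before it; the same deletion mutates chars.
import Mathlib
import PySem

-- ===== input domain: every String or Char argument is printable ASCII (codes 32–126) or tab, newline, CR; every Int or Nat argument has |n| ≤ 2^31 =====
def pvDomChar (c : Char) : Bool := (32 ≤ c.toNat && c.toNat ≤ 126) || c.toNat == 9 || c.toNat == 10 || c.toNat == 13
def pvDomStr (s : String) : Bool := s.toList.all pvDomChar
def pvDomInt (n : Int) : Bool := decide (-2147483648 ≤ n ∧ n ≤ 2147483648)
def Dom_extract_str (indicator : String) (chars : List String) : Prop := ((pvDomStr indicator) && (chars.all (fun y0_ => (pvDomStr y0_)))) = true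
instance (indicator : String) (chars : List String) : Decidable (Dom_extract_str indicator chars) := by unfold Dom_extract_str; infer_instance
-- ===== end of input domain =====

-- B locates the indicator's index in chars[1:] and joins the slice before it, instead of
-- A's accumulate-until-break loop (idiomatic). A mutates `chars` in place; B performs the
-- same deletion; the equivalence proved here is about the RETURN value only.


-- ===== PORT A =====
-- A's for-loop with break over chars[1:], accumulating `out` (kept as List Char; out+letter
-- is exactly list append of the code points); the final String is rebuilt at the end.
def extractLoopA (indicator : String) : List String → List Char → List Char
  | [], out => out
  | letter :: rest, out =>
      if letter == indicator then out
      else extractLoopA indicator rest (out ++ letter.toList)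

def extract_str (indicator : String) (chars : List String) : String :=
  String.ofList (extractLoopA indicator (PySem.List.slice chars (some 1) none) [])

-- ===== PORT B =====
def extract_str_alt (indicator : String) (chars : List String) : String :=
  let rest := PySem.List.slice chars (some 1) none
  let idx : Nat :=
    match PySem.List.index? rest indicator with   -- rest.index(indicator) if indicator in rest
    | some k => k
    | none => rest.length                         -- else len(rest)
  PySem.Str.join "" (PySem.List.slice rest none (some (idx : Int)))

-- ===== PRECONDITION & SPEC =====
def Spec_extract_str (indicator : String) (chars : List String) (out : String) : Prop := out = extract_str_alt indicator chars
instance (indicator : String) (chars : List String) (out : String) : Decidable (Spec_extract_str indicator chars out) := by unfold Spec_extract_str; infer_instance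

-- ===== CLAIM (what is proved, stated in full; the proofs are below) =====
def Claim_equal_extract_str : Prop := ∀ (indicator : String) (chars : List String), Dom_extract_str indicator chars → Spec_extract_str indicator chars (extract_str indicator chars)

-- ===== LEMMAS AND PROOFS =====

-- joining with the empty separator is concatenation
theorem join_nil_flatten (parts : List (List Char)) :
    PySem.Chars.join [] parts = parts.flatten := by
  simp [PySem.Chars.join, List.intercalate]
  induction parts with
  | nil => simp
  | cons p ps ih => cases ps <;> simp_all [List.intersperse]

-- A's loop accumulates exactly the elements before the first occurrence of the indicator
theorem extractLoopA_eq (indicator : String) (rest : List String) (acc : List Char) :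
    extractLoopA indicator rest acc =
      acc ++ ((rest.take ((PySem.List.index? rest indicator).getD rest.length)).map
                String.toList).flatten := by
  induction rest generalizing acc with
  | nil => simp [extractLoopA]
  | cons l rest ih =>
      by_cases h : l = indicator
      · subst h
        rw [PySem.List.index?_cons_self]
        simp [extractLoopA]
      · have hne : (l == indicator) = false := by simpa using h
        rw [PySem.List.index?_cons_of_ne rest h]
        simp only [extractLoopA, hne, Bool.false_eq_true, ih]
        cases hk : PySem.List.index? rest indicator with
        | some _ => simp [List.take_succ_cons]
        | none => simp [List.take_succ_cons]

-- ===== VERDICT (by name: the statement is the Claim_ definition above) =====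
theorem extract_str_spec : Claim_equal_extract_str := by
  intro indicator chars _
  show extract_str indicator chars = extract_str_alt indicator chars
  unfold extract_str extract_str_alt
  rw [extractLoopA_eq]
  have hj : ∀ (parts : List String),
      PySem.Str.join "" parts = String.ofList ((parts.map String.toList).flatten) := by
    intro parts
    apply String.toList_inj.mp
    rw [PySem.Str.toList_join]
    simpa using join_nil_flatten (parts.map String.toList)
  cases hk : PySem.List.index? (PySem.List.slice chars (some 1) none) indicator with
  | some k =>
      simp only [PySem.List.index?_eq_idxOf?] at hk
      simp [PySem.List.index?_eq_idxOf?, hk, hj, PySem.List.slice_to_natCast]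
  | none =>
      simp only [PySem.List.index?_eq_idxOf?] at hk
      simp [PySem.List.index?_eq_idxOf?, hk, hj, PySem.List.slice_to_natCast]
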